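-- pv_equiv track=rewrite | github.com/aliyasoubi/SignalMatrix | crypto/enrichment/news_impact.py | analyze_news_impact
-- ===== SOURCE A (Python) =====
-- from typing import Tuple
--
-- UP_TREND_KEYWORDS = [
--     "approved", "adoption", "launch", "win", "success", "record high", "bullish",
--     "upgrade", "institution", "partnership", "listing", "growth", "expansion", "investment"
-- ]
--
-- DOWN_TREND_KEYWORDS = [
--     "hack", "ban", "lawsuit", "sued", "down", "liquidation", "loss", "bearish", "rejected",
--     "exploit", "theft", "bankruptcy", "fine", "fraud", "security breach"
-- ]
--
-- MAJOR_EVENT_KEYWORDS = [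
--     "etf", "sec", "blackrock", "halving", "fork", "cftc", "spot etf", "approval", "regulation",
--     "institutional", "bankruptcy", "court", "verdict", "all-time high", "all time high"
-- ]
--
-- def analyze_news_impact(
--         title: str,
--         summary: str = ""
-- ) -> Tuple[int, str, bool]:
--     """
--     Analyze the news title and summary for impact and trend direction.
--
--     Args:
--         title (str): The news headline/title.
--         summary (str): The news summary or description (optional).
--
--     Returns:
--         Tuple[int, str, bool]:
--             impact_score (int): 1-10 scale of likely market impact (10=major event).
--             trend (str): "up", "down", or "neutral".
--             is_major_event (bool): True if a "major event" keyword found.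
--     """
--     text = f"{title} {summary}".lower()
--     impact_score = 1
--     trend = "neutral"
--     is_major_event = False
--
--     # Major event detection (highest impact)
--     for keyword in MAJOR_EVENT_KEYWORDS:
--         if keyword in text:
--             impact_score = 10
--             is_major_event = True
--
--     # Uptrend detection
--     for keyword in UP_TREND_KEYWORDS:
--         if keyword in text:
--             trend = "up"
--             impact_score = max(impact_score, 8 if is_major_event else 7)
--
--     # Downtrend detection
--     for keyword in DOWN_TREND_KEYWORDS:
--         if keyword in text:
--             trend = "down"
--             impact_score = max(impact_score, 8 if is_major_event else 7)
--
--     # If only major event detected, default to up (customize as needed)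
--     if trend == "neutral" and is_major_event:
--         trend = "up"
--
--     return impact_score, trend, is_major_event
-- ===== SOURCE B (Python) =====
-- UP_TREND_KEYWORDS = [
--     "approved", "adoption", "launch", "win", "success", "record high", "bullish",
--     "upgrade", "institution", "partnership", "listing", "growth", "expansion", "investment"
-- ]
--
-- DOWN_TREND_KEYWORDS = [
--     "hack", "ban", "lawsuit", "sued", "down", "liquidation", "loss", "bearish", "rejected",
--     "exploit", "theft", "bankruptcy", "fine", "fraud", "security breach"
-- ]
--
-- MAJOR_EVENT_KEYWORDS = [
--     "etf", "sec", "blackrock", "halving", "fork", "cftc", "spot etf", "approval", "regulation",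
--     "institutional", "bankruptcy", "court", "verdict", "all-time high", "all time high"
-- ]
--
-- # one merged keyword -> category table, and a first-character bucket index
-- # built once at module level
-- KEYWORD_TABLE = (
--     [(k, "major") for k in MAJOR_EVENT_KEYWORDS]
--     + [(k, "up") for k in UP_TREND_KEYWORDS]
--     + [(k, "down") for k in DOWN_TREND_KEYWORDS]
-- )
--
-- IDX = {}
-- for kw, cat in KEYWORD_TABLE:
--     IDX.setdefault(kw[0], []).append((kw, cat))
--
--
-- def analyze_news_impact(title, summary=""):
--     # Text-driven scan: walk the text once; at each position look up, in the
--     # first-character bucket index, only the tagged keywords that could start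
--     # there; collect three category flags, then derive score and trend in
--     # closed form.
--     text = f"{title} {summary}".lower()
--     major = up = down = False
--     for i in range(len(text)):
--         for kw, cat in IDX.get(text[i], ()):
--             if text.startswith(kw, i):
--                 if cat == "major":
--                     major = True
--                 elif cat == "up":
--                     up = True
--                 else:
--                     down = True
--     score = 10 if major else (7 if up or down else 1)
--     trend = "down" if down else ("up" if up or major else "neutral")
--     return score, trend, major
-- ===== Notes on version B (the rewrite author's own statement) =====
-- stated objective: alternative
-- what changed: Replaces A's three keyword-driven substring scans with mutable max/overwrite state by a text-driven algorithm: a first-character bucket index over one merged keyword->category table is built once, a single walk over the text positions checks only the bucketed keywords via startswith and collects three flags, from which score and trend are derived in closed form.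
import Mathlib
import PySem

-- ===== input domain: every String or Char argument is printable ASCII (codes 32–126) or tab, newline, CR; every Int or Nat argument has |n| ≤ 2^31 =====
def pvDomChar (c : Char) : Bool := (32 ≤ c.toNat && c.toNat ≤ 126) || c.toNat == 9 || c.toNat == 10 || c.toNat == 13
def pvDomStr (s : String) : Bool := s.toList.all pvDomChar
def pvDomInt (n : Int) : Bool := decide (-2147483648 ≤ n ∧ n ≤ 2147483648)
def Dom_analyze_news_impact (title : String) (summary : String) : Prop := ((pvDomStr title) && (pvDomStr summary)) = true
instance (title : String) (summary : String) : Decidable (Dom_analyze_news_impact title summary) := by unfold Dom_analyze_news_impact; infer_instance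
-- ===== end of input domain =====

-- B replaces A's three keyword-driven scans with mutable scoring state by a text-driven
-- position walk that consults a first-character bucket index over one merged
-- keyword->category table, collecting three flags, then derives score and trend in
-- closed form (objective: alternative).

-- module constants shared by both ports
def UP_TREND_KEYWORDS : List String :=
  ["approved", "adoption", "launch", "win", "success", "record high", "bullish",
   "upgrade", "institution", "partnership", "listing", "growth", "expansion", "investment"]

def DOWN_TREND_KEYWORDS : List String :=
  ["hack", "ban", "lawsuit", "sued", "down", "liquidation", "loss", "bearish", "rejected",
   "exploit", "theft", "bankruptcy", "fine", "fraud", "security breach"]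

def MAJOR_EVENT_KEYWORDS : List String :=
  ["etf", "sec", "blackrock", "halving", "fork", "cftc", "spot etf", "approval", "regulation",
   "institutional", "bankruptcy", "court", "verdict", "all-time high", "all time high"]

-- ===== PORT A =====
-- literal transliteration: each Python for-loop is a foldl over the same mutable state
def analyze_news_impact (title : String) (summary : String) : Int × String × Bool :=
  let text : List Char := PySem.Chars.lower (title.toList ++ [' '] ++ summary.toList)
  -- major event detection
  let st1 : Int × Bool :=
    MAJOR_EVENT_KEYWORDS.foldl
      (fun st kw => if PySem.Chars.isIn kw.toList text then (10, true) else st) (1, false)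
  let is_major_event := st1.2
  -- uptrend detection
  let st2 : Int × String :=
    UP_TREND_KEYWORDS.foldl
      (fun st kw => if PySem.Chars.isIn kw.toList text then
          (max st.1 (if is_major_event then 8 else 7), "up") else st) (st1.1, "neutral")
  -- downtrend detection
  let st3 : Int × String :=
    DOWN_TREND_KEYWORDS.foldl
      (fun st kw => if PySem.Chars.isIn kw.toList text then
          (max st.1 (if is_major_event then 8 else 7), "down") else st) st2
  let trend := if st3.2 = "neutral" ∧ is_major_event then "up" else st3.2
  (st3.1, trend, is_major_event)

-- ===== PORT B =====
-- the merged module-level keyword -> category table of Source B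
def KEYWORD_TABLE : List (String × String) :=
  (MAJOR_EVENT_KEYWORDS.map (fun k => (k, "major")))
    ++ (UP_TREND_KEYWORDS.map (fun k => (k, "up")))
    ++ (DOWN_TREND_KEYWORDS.map (fun k => (k, "down")))

-- Source B's module-level first-character bucket index: IDX.setdefault(kw[0], []).append((kw, cat)).
-- kw[0] is read with getD 0 ' '; exact here since every keyword in the literal table is nonempty.
def IDX : PySem.Dict Char (List (String × String)) :=
  KEYWORD_TABLE.foldl
    (fun d p => d.insert (p.1.toList.getD 0 ' ')
      (d.getD (p.1.toList.getD 0 ' ') [] ++ [p])) PySem.Dict.empty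

-- text[i] for i in range(len(text)) is read with getD i ' '; exact since i < len(text).
-- text.startswith(kw, i) with 0 ≤ i ≤ len(text) is exactly Chars.startswith (text.drop i) kw.
def analyze_news_impact_alt (title : String) (summary : String) : Int × String × Bool :=
  let text : List Char := PySem.Chars.lower (title.toList ++ [' '] ++ summary.toList)
  let fl : Bool × Bool × Bool :=
    (List.range text.length).foldl (fun fl i =>
      (IDX.getD (text.getD i ' ') []).foldl (fun fl p =>
        if PySem.Chars.startswith (text.drop i) p.1.toList then
          if p.2 = "major" then (true, fl.2.1, fl.2.2)
          else if p.2 = "up" then (fl.1, true, fl.2.2)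
          else (fl.1, fl.2.1, true)
        else fl) fl) (false, false, false)
  let score : Int := if fl.1 then 10 else if fl.2.1 || fl.2.2 then 7 else 1
  let trend := if fl.2.2 then "down" else if fl.2.1 || fl.1 then "up" else "neutral"
  (score, trend, fl.1)

-- ===== PRECONDITION & SPEC =====
def Spec_analyze_news_impact (title : String) (summary : String) (out : Int × String × Bool) : Prop := out = analyze_news_impact_alt title summary
instance (title : String) (summary : String) (out : Int × String × Bool) : Decidable (Spec_analyze_news_impact title summary out) := by unfold Spec_analyze_news_impact; infer_instance

-- ===== CLAIM (what is proved, stated in full; the proofs are below) =====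
def Claim_equal_analyze_news_impact : Prop := ∀ (title : String) (summary : String), Dom_analyze_news_impact title summary → Spec_analyze_news_impact title summary (analyze_news_impact title summary)

-- ===== LEMMAS AND PROOFS =====

-- A's first loop: an if-overwrite fold is the any-flag closed form
theorem foldl_const_if {α β : Type} (l : List α) (p : α → Bool) (c init : β) :
    l.foldl (fun st x => if p x then c else st) init
      = if l.any p then c else init := by
  induction l generalizing init with
  | nil => simp
  | cons h t ih =>
    by_cases hp : p h = true <;> simp [hp, ih]

-- A's second/third loop: a max-update-and-set fold is the any-flag closed form
theorem foldl_max_if {α : Type} (l : List α) (p : α → Bool) (v : Int) (t : String)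
    (init : Int × String) :
    l.foldl (fun st x => if p x then (max st.1 v, t) else st) init
      = if l.any p then (max init.1 v, t) else init := by
  induction l generalizing init with
  | nil => simp
  | cons h tl ih =>
    by_cases hp : p h = true <;> simp [hp, ih]

theorem any_false {α : Type} (l : List α) : l.any (fun _ => false) = false := by
  induction l with
  | nil => rfl
  | cons h t ih => simp [ih]

-- B's inner bucket pass: one or-update of the three flags, split by category tag
theorem foldl_catstep (q : String × String → Bool) (l : List (String × String))
    (fl : Bool × Bool × Bool) :
    l.foldl (fun fl p =>
        if q p then
          if p.2 = "major" then (true, fl.2.1, fl.2.2)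
          else if p.2 = "up" then (fl.1, true, fl.2.2)
          else (fl.1, fl.2.1, true)
        else fl) fl
      = (fl.1 || l.any (fun p => q p && decide (p.2 = "major")),
         fl.2.1 || l.any (fun p => q p && !decide (p.2 = "major") && decide (p.2 = "up")),
         fl.2.2 || l.any (fun p => q p && !decide (p.2 = "major") && !decide (p.2 = "up"))) := by
  induction l generalizing fl with
  | nil => simp
  | cons h t ih =>
    by_cases hq : q h = true <;>
      by_cases hm : h.2 = "major" <;>
      by_cases hu : h.2 = "up" <;>
      simp [hq, hm, hu, ih]

-- the build loop of IDX: a bucket holds exactly the table entries with that first char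
theorem getD_build (l : List (String × String))
    (d : PySem.Dict Char (List (String × String))) (ch : Char) :
    (l.foldl (fun d p => d.insert (p.1.toList.getD 0 ' ')
        (d.getD (p.1.toList.getD 0 ' ') [] ++ [p])) d).getD ch []
      = d.getD ch [] ++ l.filter (fun p => p.1.toList.getD 0 ' ' == ch) := by
  induction l generalizing d with
  | nil => simp
  | cons p l ih =>
    rw [List.foldl_cons, ih, PySem.Dict.getD_insert, List.filter_cons]
    by_cases hch : p.1.toList.getD 0 ' ' = ch <;>
      simp only [List.getD_eq_getElem?_getD] at hch
    · simp [hch]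
    · simp [beq_iff_eq, hch, Ne.symm hch]

theorem getD_IDX (ch : Char) :
    IDX.getD ch [] = KEYWORD_TABLE.filter (fun p => p.1.toList.getD 0 ' ' == ch) := by
  rw [IDX, getD_build]
  simp [PySem.Dict.empty, PySem.Dict.getD, PySem.Dict.get?]

-- the outer position loop: or-updates fold to any over the positions
theorem foldl_or3 (l : List Nat) (m u d : Nat → Bool) (fl : Bool × Bool × Bool) :
    l.foldl (fun fl i => (fl.1 || m i, fl.2.1 || u i, fl.2.2 || d i)) fl
      = (fl.1 || l.any m, fl.2.1 || l.any u, fl.2.2 || l.any d) := by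
  induction l generalizing fl with
  | nil => simp
  | cons h t ih => simp [List.foldl, ih, Bool.or_assoc]

theorem any_or_split {α : Type} (l : List α) (p q : α → Bool) :
    l.any (fun i => p i || q i) = (l.any p || l.any q) := by
  rw [Bool.eq_iff_iff]
  simp only [List.any_eq_true, Bool.or_eq_true]
  constructor
  · rintro ⟨i, hi, h | h⟩
    · exact Or.inl ⟨i, hi, h⟩
    · exact Or.inr ⟨i, hi, h⟩
  · rintro (⟨i, hi, h⟩ | ⟨i, hi, h⟩)
    · exact ⟨i, hi, Or.inl h⟩
    · exact ⟨i, hi, Or.inr h⟩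

-- a nonempty keyword's first-char-guarded match at some position iff it is a substring
theorem any_range_key_startswith (text k : List Char) (hk : k ≠ []) :
    (List.range text.length).any
        (fun i => PySem.Chars.startswith (text.drop i) k && (k[0]?.getD ' ' == (text[i]?).getD ' '))
      = PySem.Chars.isIn k text := by
  rcases h : PySem.Chars.isIn k text with _ | _
  · rw [List.any_eq_false]
    intro i hi hco
    rw [List.mem_range] at hi
    rw [Bool.and_eq_true] at hco
    have hsw := hco.1
    rw [PySem.Chars.startswith_iff] at hsw
    have : ∃ j, k <+: text.drop j := ⟨i, hsw⟩
    rw [PySem.Chars.exists_prefix_drop_iff_isIn] at this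
    simp [h] at this
  · rw [List.any_eq_true]
    have := (PySem.Chars.exists_prefix_drop_iff_isIn k text).mpr h
    obtain ⟨j, hj⟩ := this
    have hjlt : j < text.length := by
      by_contra hge
      rw [not_lt] at hge
      rw [List.drop_eq_nil_of_le hge] at hj
      exact hk (List.prefix_nil.mp hj)
    refine ⟨j, List.mem_range.mpr hjlt, ?_⟩
    obtain ⟨c, k', rfl⟩ := List.exists_cons_of_ne_nil hk
    have hhead : (text.drop j).head? = some c := by
      obtain ⟨t', ht'⟩ := hj
      rw [← ht']; rfl
    have htj : text[j]? = some c := by rw [← List.head?_drop]; exact hhead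
    rw [Bool.and_eq_true]
    exact ⟨(PySem.Chars.startswith_iff _ _).mpr hj, by simp [htj]⟩

-- any-over-positions equals any-over-keywords isIn, for a list of nonempty keywords
theorem any_keywords (text : List Char) (l : List String)
    (hl : l.all (fun k => !k.toList.isEmpty) = true) :
    (List.range text.length).any
        (fun i => l.any (fun k =>
          PySem.Chars.startswith (text.drop i) k.toList
            && (k.toList[0]?.getD ' ' == (text[i]?).getD ' ')))
      = l.any (fun k => PySem.Chars.isIn k.toList text) := by
  induction l with
  | nil => simp
  | cons h t ih =>
    simp only [List.all_cons, Bool.and_eq_true] at hl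
    have hne : h.toList ≠ [] := by
      intro he; rw [he] at hl; simp at hl
    simp only [List.any_cons]
    rw [any_or_split, ih hl.2, any_range_key_startswith text h.toList hne]

theorem alt_flags (text : List Char) :
    ((List.range text.length).foldl (fun fl i =>
      (IDX.getD (text.getD i ' ') []).foldl (fun fl p =>
        if PySem.Chars.startswith (text.drop i) p.1.toList then
          if p.2 = "major" then (true, fl.2.1, fl.2.2)
          else if p.2 = "up" then (fl.1, true, fl.2.2)
          else (fl.1, fl.2.1, true)
        else fl) fl) (false, false, false))
      = (MAJOR_EVENT_KEYWORDS.any (fun k => PySem.Chars.isIn k.toList text),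
         UP_TREND_KEYWORDS.any (fun k => PySem.Chars.isIn k.toList text),
         DOWN_TREND_KEYWORDS.any (fun k => PySem.Chars.isIn k.toList text)) := by
  have hbody : ∀ (fl : Bool × Bool × Bool) (i : Nat),
      (IDX.getD (text.getD i ' ') []).foldl (fun fl p =>
        if PySem.Chars.startswith (text.drop i) p.1.toList then
          if p.2 = "major" then (true, fl.2.1, fl.2.2)
          else if p.2 = "up" then (fl.1, true, fl.2.2)
          else (fl.1, fl.2.1, true)
        else fl) fl
      = (fl.1 || MAJOR_EVENT_KEYWORDS.any (fun k =>
            PySem.Chars.startswith (text.drop i) k.toList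
              && (k.toList[0]?.getD ' ' == (text[i]?).getD ' ')),
         fl.2.1 || UP_TREND_KEYWORDS.any (fun k =>
            PySem.Chars.startswith (text.drop i) k.toList
              && (k.toList[0]?.getD ' ' == (text[i]?).getD ' ')),
         fl.2.2 || DOWN_TREND_KEYWORDS.any (fun k =>
            PySem.Chars.startswith (text.drop i) k.toList
              && (k.toList[0]?.getD ' ' == (text[i]?).getD ' '))) := by
    intro fl i
    rw [getD_IDX,
      foldl_catstep (fun p => PySem.Chars.startswith (text.drop i) p.1.toList)]
    simp only [List.any_filter, KEYWORD_TABLE, List.any_append, List.any_map,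
      Function.comp_def]
    simp [any_false, Bool.and_comm]
  rw [show (fun (fl : Bool × Bool × Bool) (i : Nat) =>
      (IDX.getD (text.getD i ' ') []).foldl (fun fl p =>
        if PySem.Chars.startswith (text.drop i) p.1.toList then
          if p.2 = "major" then (true, fl.2.1, fl.2.2)
          else if p.2 = "up" then (fl.1, true, fl.2.2)
          else (fl.1, fl.2.1, true)
        else fl) fl)
      = _ from funext fun fl => funext fun i => hbody fl i]
  rw [foldl_or3]
  simp only [Bool.false_or]
  rw [any_keywords text MAJOR_EVENT_KEYWORDS (by decide),
      any_keywords text UP_TREND_KEYWORDS (by decide),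
      any_keywords text DOWN_TREND_KEYWORDS (by decide)]

theorem analyze_impl (title summary : String) :
    analyze_news_impact title summary = analyze_news_impact_alt title summary := by
  simp only [analyze_news_impact, analyze_news_impact_alt,
    foldl_const_if, foldl_max_if, alt_flags]
  rcases Bool.eq_false_or_eq_true (MAJOR_EVENT_KEYWORDS.any
      (fun k => PySem.Chars.isIn k.toList
        (PySem.Chars.lower (title.toList ++ [' '] ++ summary.toList)))) with hm | hm <;>
  rcases Bool.eq_false_or_eq_true (UP_TREND_KEYWORDS.any
      (fun k => PySem.Chars.isIn k.toList
        (PySem.Chars.lower (title.toList ++ [' '] ++ summary.toList)))) with hu | hu <;>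
  rcases Bool.eq_false_or_eq_true (DOWN_TREND_KEYWORDS.any
      (fun k => PySem.Chars.isIn k.toList
        (PySem.Chars.lower (title.toList ++ [' '] ++ summary.toList)))) with hd | hd <;>
  simp only [hm, hu, hd] <;> norm_num <;> decide

-- ===== VERDICT (by name: the statement is the Claim_ definition above) =====
theorem analyze_news_impact_spec : Claim_equal_analyze_news_impact := by
  intro title summary _
  exact analyze_impl title summary
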